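-- pv_equiv track=rewrite | github.com/liamadale/redact | backend/app/scanning/quick_scan.py | _redact_fragment
-- ===== SOURCE A (Python) =====
-- def _redact_fragment(fragment: str, pattern: str) -> str:
--     """Mask matched secret values in fragment, showing only first 4 chars."""
--     idx = fragment.find(pattern)
--     if idx == -1:
--         return fragment
--     # Find the token boundary after the pattern match
--     start = idx
--     end = start
--     for i in range(start, len(fragment)):
--         if fragment[i] in (" ", "\n", "\r", "\t", '"', "'", ",", ";"):
--             break
--         end = i + 1
--     matched = fragment[start:end]
--     if len(matched) > 4:
--         redacted = matched[:4] + "█" * (len(matched) - 4)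
--     else:
--         redacted = matched
--     return fragment[:start] + redacted + fragment[end:]
-- ===== SOURCE B (Python) =====
-- _DELIMS = ' \n\r\t"\',;'
--
--
-- def _redact_fragment(fragment: str, pattern: str) -> str:
--     """Mask matched secret values in fragment, showing only first 4 chars."""
--     start = fragment.find(pattern)
--     if start == -1:
--         return fragment
--     # End of the token = earliest position >= start of any delimiter char.
--     hits = [p for p in (fragment.find(c, start) for c in _DELIMS) if p != -1]
--     end = min(hits, default=len(fragment))
--     matched = fragment[start:end]
--     # "x" * n is "" for n <= 0, so no length branch is needed.
--     redacted = matched[:4] + "█" * (len(matched) - 4)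
--     return fragment[:start] + redacted + fragment[end:]
-- ===== Notes on version B (the rewrite author's own statement) =====
-- stated objective: faster
-- what changed: The Python-level character-by-character boundary loop with a manually maintained end index is replaced by eight single-character find(c, start) calls whose minimum (defaulting to len(fragment)) gives the token end, and the length branch around the masking is dropped since '█' * n is empty for n <= 0.
import Mathlib
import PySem

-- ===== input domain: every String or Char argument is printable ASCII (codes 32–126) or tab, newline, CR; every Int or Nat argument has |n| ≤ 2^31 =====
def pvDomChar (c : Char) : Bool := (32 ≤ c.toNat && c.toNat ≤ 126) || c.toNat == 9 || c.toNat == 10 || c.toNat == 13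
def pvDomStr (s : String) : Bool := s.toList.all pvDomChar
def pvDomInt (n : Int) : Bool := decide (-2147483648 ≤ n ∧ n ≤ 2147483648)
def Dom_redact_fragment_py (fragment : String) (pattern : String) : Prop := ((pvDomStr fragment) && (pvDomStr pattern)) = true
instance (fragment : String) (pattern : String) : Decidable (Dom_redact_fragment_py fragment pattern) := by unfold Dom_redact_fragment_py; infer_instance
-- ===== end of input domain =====

-- B replaces A's per-character boundary loop by eight single-char find(c, start) calls whose
-- minimum (default len(fragment)) is the token end, and drops the masking length branch
-- (constant-factor speedup, measured).

-- ===== PORT A =====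
-- the tuple (" ", "\n", "\r", "\t", '"', "'", ",", ";") of delimiter characters
def pvDelims : List Char := [' ', '\n', '\r', '\t', '"', '\'', ',', ';']

-- the `for i in range(start, len(fragment))` loop with its `break`; `e` is `end`
-- (the index `i` is always in range, so `pyGetD` with a dummy default is exact here)
def redactLoopA (s : List Char) : List Int → Int → Int
  | [], e => e
  | i :: rest, e =>
    if PySem.List.pyGetD s i ' ' ∈ pvDelims then e
    else redactLoopA s rest (i + 1)

def redact_fragment_py (fragment : String) (pattern : String) : String :=
  let cs := fragment.toList
  let idx := PySem.Chars.find cs pattern.toList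
  if idx = -1 then fragment
  else
    let start := idx
    let e := redactLoopA cs (PySem.List.pyRange start (cs.length : Int) 1) start
    let matched := PySem.List.slice cs (some start) (some e)
    let redacted :=
      if 4 < (matched.length : Int) then
        PySem.List.slice matched none (some 4) ++ PySem.List.pyRepeat ['█'] ((matched.length : Int) - 4)
      else matched
    String.ofList (PySem.List.slice cs none (some start) ++ redacted ++ PySem.List.slice cs (some e) none)

-- ===== PORT B =====
def redact_fragment_py_alt (fragment : String) (pattern : String) : String :=
  let cs := fragment.toList
  let start := PySem.Chars.find cs pattern.toList
  if start = -1 then fragment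
  else
    let hits := (pvDelims.map (fun c => PySem.Chars.findFrom cs [c] start)).filter (fun p => p ≠ -1)
    let e := PySem.List.minD hits (fun x => x) (cs.length : Int)
    let matched := PySem.List.slice cs (some start) (some e)
    let redacted :=
      PySem.List.slice matched none (some 4) ++ PySem.List.pyRepeat ['█'] ((matched.length : Int) - 4)
    String.ofList (PySem.List.slice cs none (some start) ++ redacted ++ PySem.List.slice cs (some e) none)

-- ===== PRECONDITION & SPEC =====
def Spec_redact_fragment_py (fragment : String) (pattern : String) (out : String) : Prop := out = redact_fragment_py_alt fragment pattern
instance (fragment : String) (pattern : String) (out : String) : Decidable (Spec_redact_fragment_py fragment pattern out) := by unfold Spec_redact_fragment_py; infer_instance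

-- ===== CLAIM (what is proved, stated in full; the proofs are below) =====
def Claim_equal_redact_fragment_py : Prop := ∀ (fragment : String) (pattern : String), Dom_redact_fragment_py fragment pattern → Spec_redact_fragment_py fragment pattern (redact_fragment_py fragment pattern)

-- ===== LEMMAS AND PROOFS =====

-- A's loop computes k + (length of the non-delimiter prefix of `s.drop k`)
theorem redactLoopA_eq (s : List Char) (k : Nat) (hk : k ≤ s.length) :
    redactLoopA s (PySem.List.pyRange (k : Int) (s.length : Int) 1) (k : Int)
      = (k : Int) + (((s.drop k).takeWhile (fun c => !(pvDelims.contains c))).length : Int) := by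
  induction hn : s.length - k generalizing k with
  | zero =>
    have hk' : k = s.length := by omega
    subst hk'
    rw [PySem.List.pyRange_one_eq_nil (by omega)]
    simp [redactLoopA, List.drop_length]
  | succ n ih =>
    have hlt : k < s.length := by omega
    rw [PySem.List.pyRange_one_cons (by exact_mod_cast hlt)]
    have hdrop : s.drop k = s[k] :: s.drop (k + 1) := List.drop_eq_getElem_cons hlt
    rw [redactLoopA]
    rw [PySem.List.pyGetD_eq_getElem s ' ' (by positivity) (by exact_mod_cast hlt)]
    simp only [Int.toNat_natCast]
    by_cases hd : s[k] ∈ pvDelims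
    · rw [if_pos hd, hdrop]
      simp [hd]
    · rw [if_neg hd]
      have hcast : ((k : Int) + 1) = ((k + 1 : Nat) : Int) := by push_cast; ring
      rw [hcast, ih (k + 1) (by omega) (by omega)]
      rw [hdrop]
      rw [List.takeWhile_cons, if_pos (by simpa using hd), List.length_cons]
      push_cast; ring

-- `find` always points at the first occurrence: uniqueness of the spec
theorem find_unique (s sub : List Char) (k : Nat)
    (hk : sub <+: s.drop k) (hmin : ∀ i, i < k → ¬ sub <+: s.drop i) :
    PySem.Chars.find s sub = (k : Int) := by
  have hinf : sub <:+: s := hk.isInfix.trans (List.drop_suffix k s).isInfix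
  have h0 : 0 ≤ PySem.Chars.find s sub := (PySem.Chars.find_nonneg_iff s sub).mpr hinf
  obtain ⟨h1, h2⟩ := PySem.Chars.find_spec h0
  have : (PySem.Chars.find s sub).toNat = k := by
    rcases lt_trichotomy (PySem.Chars.find s sub).toNat k with h | h | h
    · exact absurd h1 (hmin _ h)
    · exact h
    · exact absurd hk (h2 k h)
  omega

theorem singleton_prefix_drop (l : List Char) (c : Char) (i : Nat) :
    [c] <+: l.drop i ↔ l[i]? = some c := by
  constructor
  · rintro ⟨t, ht⟩
    have h0 : (l.drop i)[0]? = some c := by rw [← ht]; rfl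
    simpa [List.getElem?_drop] using h0
  · intro h
    have hi : i < l.length := by
      by_contra hh
      rw [List.getElem?_eq_none (by omega)] at h; cases h
    rw [List.drop_eq_getElem_cons hi]
    have hc : l[i] = c := by simpa [List.getElem?_eq_getElem hi] using h
    exact ⟨l.drop (i+1), by rw [hc]; rfl⟩

theorem idxOf_min (l : List Char) (c : Char) (i : Nat) (hi : i < l.length) (hc : l[i] = c) :
    l.idxOf c ≤ i := by
  induction l generalizing i with
  | nil => simp at hi
  | cons a t ih =>
    by_cases hac : a = c
    · simp [hac]
    · cases i with
      | zero => simp at hc; exact absurd hc hac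
      | succ j =>
        simp only [List.length_cons] at hi
        have := ih j (by omega) (by simpa using hc)
        simp [hac]
        omega

-- find for a single-character needle is idxOf
theorem find_singleton (l : List Char) (c : Char) :
    PySem.Chars.find l [c] = if c ∈ l then ((l.idxOf c : Nat) : Int) else -1 := by
  by_cases h : c ∈ l
  · rw [if_pos h]
    have hi : l.idxOf c < l.length := List.idxOf_lt_length_of_mem h
    apply find_unique
    · exact (singleton_prefix_drop l c _).mpr (by simp [List.getElem?_eq_getElem hi, List.getElem_idxOf hi])
    · intro i hilt hpre
      have hg := (singleton_prefix_drop l c i).mp hpre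
      have hl : i < l.length := by
        by_contra hh; rw [List.getElem?_eq_none (by omega)] at hg; cases hg
      have hgc : l[i] = c := by simpa [List.getElem?_eq_getElem hl] using hg
      exact absurd (idxOf_min l c i hl hgc) (by omega)
  · rw [if_neg h]
    apply PySem.Chars.find_eq_neg_one_iff _ _ |>.mpr
    intro hinf
    exact h (by simpa using hinf.mem (by simp))

-- shifting every element and the default shifts the min
theorem min?_map_add' (s : Int) (xs : List Int) :
    PySem.List.min? (xs.map (fun x => s + x)) (fun x => x)
      = (PySem.List.min? xs (fun x => x)).map (fun x => s + x) := by
  cases xs with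
  | nil => rfl
  | cons x t =>
    rw [List.map_cons, PySem.List.min?_id_cons, PySem.List.min?_id_cons]
    simp only [Option.map_some]
    congr 1
    induction t generalizing x with
    | nil => rfl
    | cons a r ih =>
      rw [List.map_cons, List.foldl_cons, List.foldl_cons, min_add_add_left, ih]

theorem minD_map_add (s : Int) (xs : List Int) (d : Int) :
    PySem.List.minD (xs.map (fun x => s + x)) (fun x => x) (s + d)
      = s + PySem.List.minD xs (fun x => x) d := by
  unfold PySem.List.minD
  rw [min?_map_add']
  cases PySem.List.min? xs (fun x => x) <;> rfl

-- the min of the per-delimiter first-occurrence indexes is the non-delimiter prefix length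
theorem minD_delims (d : List Char) :
    PySem.List.minD
        ((pvDelims.filter (fun c => c ∈ d)).map (fun c => ((d.idxOf c : Nat) : Int)))
        (fun x => x) (d.length : Int)
      = ((d.takeWhile (fun c => !(pvDelims.contains c))).length : Int) := by
  induction d with
  | nil => simp [PySem.List.minD, PySem.List.min?]
  | cons a t ih =>
    by_cases ha : a ∈ pvDelims
    · -- head is a delimiter: 0 is in the list, everything is ≥ 0, min is 0
      rw [List.takeWhile_cons, if_neg (by simpa using ha)]
      simp only [List.length_nil, Nat.cast_zero]
      set xs := ((pvDelims.filter (fun c => c ∈ a :: t)).map (fun c => (((a :: t).idxOf c : Nat) : Int))) with hxs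
      have h0 : (0 : Int) ∈ xs := by
        rw [hxs]
        refine List.mem_map.mpr ⟨a, List.mem_filter.mpr ⟨ha, by simp⟩, ?_⟩
        simp
      have hnn : ∀ x ∈ xs, (0 : Int) ≤ x := by
        rw [hxs]; intro x hx
        obtain ⟨c, _, hc⟩ := List.mem_map.mp hx
        omega
      have hne : xs ≠ [] := by intro hh; rw [hh] at h0; cases h0
      obtain ⟨m, hm⟩ : ∃ m, PySem.List.min? xs (fun x => x) = some m := by
        cases hh : PySem.List.min? xs (fun x => x) with
        | none => exact absurd ((PySem.List.min?_eq_none_iff _ _).mp hh) hne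
        | some m => exact ⟨m, rfl⟩
      have hmem := PySem.List.min?_mem hm
      have hmin := PySem.List.min?_isMin hm
      have hm0 : m = 0 := le_antisymm (hmin 0 h0) (hnn m hmem)
      simp [PySem.List.minD, hm, hm0]
    · -- head not a delimiter: shift everything by one
      rw [List.takeWhile_cons, if_pos (by simpa using ha)]
      have hfil : pvDelims.filter (fun c => c ∈ a :: t) = pvDelims.filter (fun c => c ∈ t) := by
        apply List.filter_congr
        intro c hc
        have hne : c ≠ a := fun hh => ha (hh ▸ hc)
        simp [List.mem_cons, hne]
      have hmap : (pvDelims.filter (fun c => c ∈ t)).map (fun c => (((a :: t).idxOf c : Nat) : Int))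
          = ((pvDelims.filter (fun c => c ∈ t)).map (fun c => ((t.idxOf c : Nat) : Int))).map (fun x => 1 + x) := by
        rw [List.map_map]
        apply List.map_congr_left
        intro c hc
        have hca : a ≠ c := by
          intro hh; exact ha (hh ▸ (List.mem_filter.mp hc).1)
        simp [hca]
        ring
      rw [hfil, hmap]
      have hlen : ((a :: t).length : Int) = 1 + (t.length : Int) := by simp; ring
      rw [hlen, minD_map_add 1 _ (t.length : Int), ih]
      simp; ring

-- the boundary computations of the two ports agree
theorem end_eq (cs ps : List Char) (h : PySem.Chars.find cs ps ≠ -1) :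
    redactLoopA cs (PySem.List.pyRange (PySem.Chars.find cs ps) (cs.length : Int) 1) (PySem.Chars.find cs ps)
      = PySem.List.minD
          ((pvDelims.map (fun c => PySem.Chars.findFrom cs [c] (PySem.Chars.find cs ps))).filter (fun p => p ≠ -1))
          (fun x => x) (cs.length : Int) := by
  have h0 : 0 ≤ PySem.Chars.find cs ps := by
    have := PySem.Chars.neg_one_le_find cs ps; omega
  set k := (PySem.Chars.find cs ps).toNat with hkdef
  have hk : PySem.Chars.find cs ps = (k : Int) := by omega
  have hklen : k ≤ cs.length := by
    have := PySem.Chars.find_le_length cs ps; omega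
  set d := cs.drop k with hd
  rw [hk, redactLoopA_eq cs k hklen]
  have hg : ∀ c ∈ pvDelims, PySem.Chars.findFrom cs [c] (k : Int)
      = if c ∈ d then (k : Int) + ((d.idxOf c : Nat) : Int) else -1 := by
    intro c _
    rw [PySem.Chars.findFrom_natCast cs [c] k hklen, find_singleton]
    by_cases hcd : c ∈ d
    · rw [if_pos hcd, if_pos hcd, if_neg (by omega)]
    · rw [if_neg hcd, if_neg hcd, if_pos rfl]
  rw [List.map_congr_left hg, List.filter_map]
  have hfil : pvDelims.filter ((fun p => decide (p ≠ -1)) ∘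
        (fun c => if c ∈ d then (k : Int) + ((d.idxOf c : Nat) : Int) else -1))
      = pvDelims.filter (fun c => c ∈ d) := by
    apply List.filter_congr
    intro c _
    by_cases hcd : c ∈ d
    · simp [hcd]; omega
    · simp [hcd]
  rw [hfil]
  have hmap : (pvDelims.filter (fun c => c ∈ d)).map
        (fun c => if c ∈ d then (k : Int) + ((d.idxOf c : Nat) : Int) else -1)
      = ((pvDelims.filter (fun c => c ∈ d)).map (fun c => ((d.idxOf c : Nat) : Int))).map
        (fun x => (k : Int) + x) := by
    rw [List.map_map]
    apply List.map_congr_left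
    intro c hc
    rw [if_pos (by simpa using (List.mem_filter.mp hc).2)]
    rfl
  rw [hmap]
  have hlen : (cs.length : Int) = (k : Int) + (d.length : Int) := by
    rw [hd, List.length_drop]; omega
  rw [hlen, minD_map_add, minD_delims]

-- the length branch around the masking collapses: "x" * n is empty for n <= 0
theorem mask_eq (m : List Char) :
    (if 4 < (m.length : Int) then
        PySem.List.slice m none (some 4) ++ PySem.List.pyRepeat ['█'] ((m.length : Int) - 4)
      else m)
    = PySem.List.slice m none (some 4) ++ PySem.List.pyRepeat ['█'] ((m.length : Int) - 4) := by
  by_cases hm : 4 < (m.length : Int)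
  · rw [if_pos hm]
  · rw [if_neg hm]
    rw [PySem.List.slice_to m (by omega), PySem.List.pyRepeat_singleton]
    have h1 : m.take (4 : Int).toNat = m := List.take_of_length_le (by omega)
    have h2 : ((m.length : Int) - 4).toNat = 0 := by omega
    rw [h1, h2, List.replicate_zero, List.append_nil]

-- ===== VERDICT (by name: the statement is the Claim_ definition above) =====
theorem redact_fragment_py_spec : Claim_equal_redact_fragment_py := by
  intro fragment pattern _hdom
  unfold Spec_redact_fragment_py redact_fragment_py redact_fragment_py_alt
  by_cases h : PySem.Chars.find fragment.toList pattern.toList = -1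
  · rw [if_pos h, if_pos h]
  · rw [if_neg h, if_neg h]
    simp only [end_eq fragment.toList pattern.toList h, mask_eq]
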